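-- pv_equiv track=rewrite | github.com/anatolykabakov/programming | dsa/python3/subsets.py | nondistinct_subsets
-- ===== SOURCE A (Python) =====
-- def nondistinct_subsets(nums):
--     subsets = []
--
--     def backtracking(i, subset):
--         # base case
--         if i >= len(nums):
--             subsets.append(subset.copy())
--             return
--
--         # for each element, we explore all subsets that include i element
--         subset.append(nums[i])
--         backtracking(i + 1, subset)
--         # then we explowe subsets that dont not include i element
--         subset.pop()
--         # skip dublicates
--         while i + 1 < len(nums) and nums[i] == nums[i + 1]:
--             i += 1
--         backtracking(i + 1, subset)
--
--     nums.sort()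
--     backtracking(0, [])
--
--     return subsets
-- ===== SOURCE B (Python) =====
-- def nondistinct_subsets(nums):
--     # sort in place (same side effect as the original), then work on (value, run-length) groups
--     nums.sort()
--
--     def groups(lst):
--         if not lst:
--             return []
--         v = lst[0]
--         rest = lst[1:]
--         k = 0
--         while k < len(rest) and rest[k] == v:
--             k += 1
--         return [(v, k + 1)] + groups(rest[k:])
--
--     gs = groups(nums)
--     subsets = []
--
--     def rec(g, acc):
--         if g == len(gs):
--             subsets.append(acc)
--             return
--         v, c = gs[g]
--         for t in range(c + 1):
--             rec(g + 1, acc + [v] * (c - t))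
--
--     rec(0, [])
--     return subsets
-- ===== Notes on version B (the rewrite author's own statement) =====
-- stated objective: alternative
-- what changed: Replaces the index-based backtracking with its while-loop duplicate skip by a run-length encoding of the sorted list: build (value, count) groups once, then recurse over the groups appending c, c-1, ..., 0 copies of each value, which reproduces the include-more-first ordering without any duplicate-skipping scan; both versions sort nums in place.
import Mathlib
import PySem

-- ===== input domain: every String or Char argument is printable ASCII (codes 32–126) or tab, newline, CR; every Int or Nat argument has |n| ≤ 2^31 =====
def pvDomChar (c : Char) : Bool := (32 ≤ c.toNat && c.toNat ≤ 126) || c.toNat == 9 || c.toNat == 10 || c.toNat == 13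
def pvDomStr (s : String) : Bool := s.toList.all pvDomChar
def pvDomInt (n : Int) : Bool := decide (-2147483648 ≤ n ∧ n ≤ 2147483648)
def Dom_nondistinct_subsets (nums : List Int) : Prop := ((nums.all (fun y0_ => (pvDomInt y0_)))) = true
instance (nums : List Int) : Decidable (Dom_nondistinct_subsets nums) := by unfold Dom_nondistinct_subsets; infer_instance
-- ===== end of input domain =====

-- ===== PORT A =====
-- Port of A: in-place sort, then index-based backtracking; the global `subsets`
-- accumulator becomes the concatenated return value. (A mutates `nums` by sorting
-- in place; B performs the same mutation, so the side effect is identical.)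

-- the `while i + 1 < len(nums) and nums[i] == nums[i + 1]: i += 1` loop
def pvSkipDup (l : List Int) (i : Nat) : Nat :=
  if _h : i + 1 < l.length ∧ l.getD i 0 = l.getD (i + 1) 0 then pvSkipDup l (i + 1) else i
termination_by l.length - i

theorem pvSkipDup_ge (l : List Int) (i : Nat) : i ≤ pvSkipDup l i := by
  unfold pvSkipDup
  split
  · exact le_trans (Nat.le_succ i) (pvSkipDup_ge l (i + 1))
  · exact le_refl i
termination_by l.length - i

def pvBtA (l : List Int) (i : Nat) (s : List Int) : List (List Int) :=
  if h : i ≥ l.length then [s]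
  else pvBtA l (i + 1) (s ++ [l.getD i 0]) ++ pvBtA l (pvSkipDup l i + 1) s
termination_by l.length - i
decreasing_by
  · omega
  · have := pvSkipDup_ge l i; omega

def nondistinct_subsets (nums : List Int) : List (List Int) :=
  pvBtA (PySem.List.sorted nums (fun x => x) false) 0 []

-- ===== PORT B =====
-- Port of B: sort, build (value, run-length) groups, then recurse over the groups
-- appending c, c-1, …, 0 copies of each value.

-- the `while k < len(rest) and rest[k] == v: k += 1` leading-run counter
def pvRunLen (l : List Int) (v : Int) : Nat :=
  match l with
  | [] => 0
  | x :: xs => if x = v then pvRunLen xs v + 1 else 0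

def pvGroups : List Int → List (Int × Nat)
  | [] => []
  | x :: xs => (x, pvRunLen xs x + 1) :: pvGroups (xs.drop (pvRunLen xs x))
termination_by l => l.length
decreasing_by
  simp only [List.length_drop, List.length_cons]; omega

def pvGRec : List (Int × Nat) → List Int → List (List Int)
  | [], acc => [acc]
  | (v, c) :: gs, acc =>
      (List.range (c + 1)).foldl (fun out t => out ++ pvGRec gs (acc ++ List.replicate (c - t) v)) []

def nondistinct_subsets_alt (nums : List Int) : List (List Int) :=
  pvGRec (pvGroups (PySem.List.sorted nums (fun x => x) false)) []

-- ===== PRECONDITION & SPEC =====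
def Spec_nondistinct_subsets (nums : List Int) (out : List (List Int)) : Prop := out = nondistinct_subsets_alt nums
instance (nums : List Int) (out : List (List Int)) : Decidable (Spec_nondistinct_subsets nums out) := by unfold Spec_nondistinct_subsets; infer_instance

-- ===== CLAIM (what is proved, stated in full; the proofs are below) =====
def Claim_equal_nondistinct_subsets : Prop := ∀ (nums : List Int), Dom_nondistinct_subsets nums → Spec_nondistinct_subsets nums (nondistinct_subsets nums)

-- ===== LEMMAS AND PROOFS =====

-- structural (list-consuming) version of A's backtracking, the bridge between the ports
def pvBtB : List Int → List Int → List (List Int)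
  | [], s => [s]
  | x :: xs, s => pvBtB xs (s ++ [x]) ++ pvBtB (xs.drop (pvRunLen xs x)) s
termination_by l _ => l.length
decreasing_by
  · simp
  · simp only [List.length_drop, List.length_cons]; omega

theorem pvSkipDup_eq (l : List Int) (i : Nat) (h : i < l.length) :
    pvSkipDup l i = i + pvRunLen (l.drop (i + 1)) (l.getD i 0) := by
  rw [pvSkipDup]
  by_cases hc : i + 1 < l.length ∧ l.getD i 0 = l.getD (i + 1) 0
  · rw [dif_pos hc]
    have hd : l.drop (i + 1) = l.getD (i + 1) 0 :: l.drop (i + 1 + 1) := by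
      rw [List.drop_eq_getElem_cons hc.1]
      simp [List.getElem?_eq_getElem hc.1]
    have ih := pvSkipDup_eq l (i + 1) hc.1
    rw [hd, pvRunLen, if_pos hc.2.symm, hc.2, ih]
    omega
  · rw [dif_neg hc]
    have hz : pvRunLen (l.drop (i + 1)) (l.getD i 0) = 0 := by
      by_cases hl : i + 1 < l.length
      · have hne : l.getD i 0 ≠ l.getD (i + 1) 0 := fun he => hc ⟨hl, he⟩
        have hd : l.drop (i + 1) = l.getD (i + 1) 0 :: l.drop (i + 1 + 1) := by
          rw [List.drop_eq_getElem_cons hl]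
          simp [List.getElem?_eq_getElem hl]
        rw [hd, pvRunLen, if_neg (fun he => hne he.symm)]
      · rw [List.drop_eq_nil_of_le (by omega)]
        rfl
    omega
termination_by l.length - i

theorem pvBtA_eq_pvBtB (l : List Int) (i : Nat) (s : List Int) :
    pvBtA l i s = pvBtB (l.drop i) s := by
  rw [pvBtA]
  by_cases h : i ≥ l.length
  · rw [dif_pos h, List.drop_eq_nil_of_le h, pvBtB]
  · rw [dif_neg h]
    have hi : i < l.length := lt_of_not_ge h
    have hd : l.drop i = l.getD i 0 :: l.drop (i + 1) := by
      rw [List.drop_eq_getElem_cons hi, List.getD_eq_getElem l 0 hi]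
    rw [hd, pvBtB, pvBtA_eq_pvBtB l (i + 1) (s ++ [l.getD i 0]),
        pvBtA_eq_pvBtB l (pvSkipDup l i + 1) s]
    have hdd : l.drop (pvSkipDup l i + 1) =
        (l.drop (i + 1)).drop (pvRunLen (l.drop (i + 1)) (l.getD i 0)) := by
      rw [List.drop_drop, pvSkipDup_eq l i hi]
      congr 1
      omega
    rw [hdd]
termination_by l.length - i
decreasing_by
  · omega
  · have := pvSkipDup_ge l i; omega

theorem pvFoldl_app {α β : Type} (f : β → List α) :
    ∀ (l : List β) (init : List α),
      l.foldl (fun out t => out ++ f t) init = init ++ l.flatMap f := by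
  intro l
  induction l with
  | nil => intro init; simp
  | cons x xs ih => intro init; simp [List.foldl_cons, ih, List.flatMap_cons]

theorem pvRunLen_drop_self : ∀ (xs : List Int) (v : Int),
    pvRunLen (xs.drop (pvRunLen xs v)) v = 0 := by
  intro xs
  induction xs with
  | nil => intro v; rfl
  | cons y ys ih =>
    intro v
    by_cases hy : y = v
    · simp only [pvRunLen, if_pos hy, List.drop_succ_cons]
      exact ih v
    · simp [pvRunLen, if_neg hy]

theorem pvRunLen_decomp : ∀ (xs : List Int) (v : Int),
    List.replicate (pvRunLen xs v) v ++ xs.drop (pvRunLen xs v) = xs := by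
  intro xs
  induction xs with
  | nil => intro v; rfl
  | cons y ys ih =>
    intro v
    by_cases hy : y = v
    · simp only [pvRunLen, if_pos hy, List.replicate_succ, List.drop_succ_cons, List.cons_append]
      rw [ih v, hy]
    · simp [pvRunLen, if_neg hy]

theorem pvRunLen_replicate (v : Int) (t : List Int) (ht : pvRunLen t v = 0) :
    ∀ (r : Nat), pvRunLen (List.replicate r v ++ t) v = r := by
  intro r
  induction r with
  | zero => simpa using ht
  | succ r ih =>
    rw [List.replicate_succ, List.cons_append, pvRunLen, if_pos rfl, ih]

theorem pvBtB_run (v : Int) (t : List Int) (ht : pvRunLen t v = 0)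
    (hrec : ∀ s : List Int, pvBtB t s = pvGRec (pvGroups t) s) :
    ∀ (r : Nat) (s : List Int),
      pvBtB (List.replicate r v ++ t) s =
        (List.range (r + 1)).flatMap
          (fun u => pvGRec (pvGroups t) (s ++ List.replicate (r - u) v)) := by
  intro r
  induction r with
  | zero =>
    intro s
    simpa using hrec s
  | succ r ih =>
    intro s
    rw [List.replicate_succ, List.cons_append, pvBtB,
        pvRunLen_replicate v t ht r,
        List.drop_left' (List.length_replicate), ih (s ++ [v]), hrec s]
    rw [List.range_succ (n := r + 1), List.flatMap_append]
    have h1 : (List.range (r + 1)).flatMap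
          (fun u => pvGRec (pvGroups t) (s ++ [v] ++ List.replicate (r - u) v)) =
        (List.range (r + 1)).flatMap
          (fun u => pvGRec (pvGroups t) (s ++ List.replicate (r + 1 - u) v)) := by
      rw [List.flatMap, List.flatMap]
      congr 1
      apply List.map_congr_left
      intro u hu
      have hu' : u < r + 1 := List.mem_range.mp hu
      congr 1
      rw [List.append_assoc]
      congr 1
      have : r + 1 - u = (r - u) + 1 := by omega
      rw [this, List.replicate_succ, List.singleton_append]
    rw [h1]
    simp

theorem pvBtB_eq_pvGRec (l : List Int) (s : List Int) :
    pvBtB l s = pvGRec (pvGroups l) s := by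
  match l with
  | [] => simp [pvBtB, pvGroups, pvGRec]
  | x :: xs =>
    have hdec := pvRunLen_decomp xs x
    have hcons : x :: xs = List.replicate (pvRunLen xs x + 1) x ++ xs.drop (pvRunLen xs x) := by
      rw [List.replicate_succ, List.cons_append, hdec]
    have hrec : ∀ s' : List Int,
        pvBtB (xs.drop (pvRunLen xs x)) s' = pvGRec (pvGroups (xs.drop (pvRunLen xs x))) s' := by
      intro s'
      exact pvBtB_eq_pvGRec (xs.drop (pvRunLen xs x)) s'
    conv_lhs => rw [hcons]
    rw [pvBtB_run x (xs.drop (pvRunLen xs x)) (pvRunLen_drop_self xs x) hrec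
          (pvRunLen xs x + 1) s]
    have hg : pvGroups (x :: xs) =
        (x, pvRunLen xs x + 1) :: pvGroups (xs.drop (pvRunLen xs x)) := by
      rw [pvGroups]
    rw [hg, pvGRec, pvFoldl_app]
    simp
termination_by l.length
decreasing_by
  simp only [List.length_drop, List.length_cons]
  omega

-- ===== VERDICT (by name: the statement is the Claim_ definition above) =====
theorem nondistinct_subsets_spec : Claim_equal_nondistinct_subsets := by
  intro nums _
  unfold Spec_nondistinct_subsets nondistinct_subsets nondistinct_subsets_alt
  rw [pvBtA_eq_pvBtB, List.drop_zero, pvBtB_eq_pvGRec]
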